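-- pv_equiv track=rewrite | github.com/changpil/pyPractice | CodingInterviews/Sessions/Graph/1129.ShortestPathwithAlternatingColors.py | shortestAlternatingPaths
-- ===== SOURCE A (Python) =====
-- import collections
-- import collections
--
-- def shortestAlternatingPaths(n, red_edges, blue_edges):
--     counts = {i: -1 for i in range(n)}
--     counts[0] = 0
--     visited = {}
--     visited[(-1, 0, "red")] = 0
--     visited[(-1, 0, "blue")] = 0
--     queue = collections.deque()
--     queue.append((-1, 0, None))
--     visited[(-1, 0, None)] = 0
--     while queue:
--         prevN, curN, prevColor = queue.popleft()
--
--         for nextN in range(n):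
--             # if curN == nextN:
--             #    continue
--
--             # previousColor = blue/None and nextColor == red
--             if (prevColor == "blue" or prevColor == None) and (curN, nextN, "red") not in visited and [curN,
--                                                                                                        nextN] in red_edges:
--                 queue.append((curN, nextN, "red"))
--                 if counts[nextN] == -1:
--                     counts[nextN] = visited[(prevN, curN, "blue")] + 1
--                 visited[(curN, nextN, "red")] = visited[(prevN, curN, "blue")] + 1
--             # previousColor = red/None and nextColor == blue
--             if (prevColor == "red" or prevColor == None) and (curN, nextN, "blue") not in visited and [curN,
--                                                                                                        nextN] in blue_edges:
--                 queue.append((curN, nextN, "blue"))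
--
--                 if counts[nextN] == -1:
--                     counts[nextN] = visited[(prevN, curN, "red")] + 1
--                 visited[(curN, nextN, "blue")] = visited[(prevN, curN, "red")] + 1
--
--     rev = []
--     for i in range(n):
--         rev.append(counts[i])
--     return rev
--
-- n = 6
-- ===== SOURCE B (Python) =====
-- import collections
--
--
-- def shortestAlternatingPaths(n, red_edges, blue_edges):
--     if n <= 0:
--         return []
--     # adjacency sets built once, so the BFS never rescans range(n) or the edge lists
--     red_adj = {u: set() for u in range(n)}
--     blue_adj = {u: set() for u in range(n)}
--     for e in red_edges:
--         if len(e) == 2 and 0 <= e[0] < n and 0 <= e[1] < n: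
--             red_adj[e[0]].add(e[1])
--     for e in blue_edges:
--         if len(e) == 2 and 0 <= e[0] < n and 0 <= e[1] < n:
--             blue_adj[e[0]].add(e[1])
--     res = {u: -1 for u in range(n)}
--     res[0] = 0
--     seen = set()  # colored edges (u, v, color) already traversed
--     queue = collections.deque([(0, None, 0)])  # (node, color of arriving edge, distance)
--     while queue:
--         u, c, d = queue.popleft()
--         for v in sorted(red_adj[u] | blue_adj[u]):
--             if c != "red" and v in red_adj[u] and (u, v, "red") not in seen:
--                 seen.add((u, v, "red"))
--                 if res[v] == -1:
--                     res[v] = d + 1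
--                 queue.append((v, "red", d + 1))
--             if c != "blue" and v in blue_adj[u] and (u, v, "blue") not in seen:
--                 seen.add((u, v, "blue"))
--                 if res[v] == -1:
--                     res[v] = d + 1
--                 queue.append((v, "blue", d + 1))
--     return [res[u] for u in range(n)]
-- ===== Notes on version B (the rewrite author's own statement) =====
-- stated objective: faster
-- what changed: B builds per-node red/blue adjacency sets once and BFSes over them with distances carried in the queue and a visited set of colored edges, instead of A's per-dequeued-state scan of all of range(n) with a linear membership test of the raw edge lists and distances re-read from a dict keyed by (prev, cur, color).
import Mathlib
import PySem

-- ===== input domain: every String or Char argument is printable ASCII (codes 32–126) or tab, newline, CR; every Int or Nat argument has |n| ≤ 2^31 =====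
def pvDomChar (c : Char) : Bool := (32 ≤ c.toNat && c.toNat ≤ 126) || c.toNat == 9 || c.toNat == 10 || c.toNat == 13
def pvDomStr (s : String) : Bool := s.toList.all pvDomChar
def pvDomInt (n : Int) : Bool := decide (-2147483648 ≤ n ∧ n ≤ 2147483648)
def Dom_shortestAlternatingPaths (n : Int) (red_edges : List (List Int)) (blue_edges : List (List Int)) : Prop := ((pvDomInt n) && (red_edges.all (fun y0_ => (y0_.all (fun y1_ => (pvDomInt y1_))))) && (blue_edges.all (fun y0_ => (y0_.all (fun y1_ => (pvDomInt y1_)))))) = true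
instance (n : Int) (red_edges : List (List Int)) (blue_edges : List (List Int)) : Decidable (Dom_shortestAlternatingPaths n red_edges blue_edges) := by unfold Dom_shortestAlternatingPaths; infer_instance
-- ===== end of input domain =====

-- B replaces A's per-state scan of range(n) and of the raw edge lists by adjacency sets
-- built once, carrying distances in the queue instead of a dict of visited distances (faster).

-- ===== PORT A =====
-- A's loop state: (counts, visited, queue); queue triples are (prevN, curN, prevColor).
abbrev pvSA := PySem.Dict Int Int × PySem.Dict (Int × Int × Option String) Int × List (Int × Int × Option String)

-- one of A's two symmetric `if` branches (col = colour being tried, other = the opposite colour)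
def pvABranch (edges : List (List Int)) (prevN curN : Int) (prevColor : Option String)
    (col other : String) (s : pvSA) (nextN : Int) : pvSA :=
  if (prevColor == some other || prevColor == none)
      && !(s.2.1.contains (curN, nextN, some col)) && edges.contains [curN, nextN] then
    (if s.1.getD nextN 0 == -1 then
        s.1.insert nextN (s.2.1.getD (prevN, curN, some other) 0 + 1)
      else s.1,
     s.2.1.insert (curN, nextN, some col) (s.2.1.getD (prevN, curN, some other) 0 + 1),
     s.2.2 ++ [(curN, nextN, some col)])
  else s

-- body of A's `for nextN in range(n)`: red branch, then blue branch
def pvAStep (red_edges blue_edges : List (List Int)) (prevN curN : Int) (prevColor : Option String)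
    (s : pvSA) (nextN : Int) : pvSA :=
  pvABranch blue_edges prevN curN prevColor "blue" "red"
    (pvABranch red_edges prevN curN prevColor "red" "blue" s nextN) nextN

-- A's `while queue:` loop (fuel only makes it total; it is never exhausted: each push
-- adds a fresh visited key (u, v, colour) with 0 ≤ u, v < n, so pops ≤ 2*n*n + 1)
def pvALoop (n : Int) (red_edges blue_edges : List (List Int)) : Nat → pvSA → PySem.Dict Int Int
  | 0, s => s.1
  | fuel + 1, s =>
    match s.2.2 with
    | [] => s.1
    | (prevN, curN, prevColor) :: rest =>
      pvALoop n red_edges blue_edges fuel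
        ((PySem.List.pyRange 0 n 1).foldl (pvAStep red_edges blue_edges prevN curN prevColor)
          (s.1, s.2.1, rest))

def shortestAlternatingPaths (n : Int) (red_edges : List (List Int)) (blue_edges : List (List Int)) : List Int :=
  let counts := ((PySem.List.pyRange 0 n 1).foldl (fun d i => d.insert i (-1)) PySem.Dict.empty).insert 0 0
  -- visited lookups in the loop always hit an existing key (see the branch guards), so getD's default is never read
  let visited : PySem.Dict (Int × Int × Option String) Int :=
    ((PySem.Dict.empty.insert ((-1 : Int), (0 : Int), some "red") 0).insert (-1, 0, some "blue") 0).insert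
      (-1, 0, none) 0
  let final := pvALoop n red_edges blue_edges (2 * n.toNat * n.toNat + 2) (counts, visited, [(-1, 0, none)])
  (PySem.List.pyRange 0 n 1).foldl (fun rev i => rev ++ [final.getD i 0]) []

-- ===== PORT B =====
-- B's loop state: (res, seen, queue); queue triples are (node, colour of arriving edge, distance).
abbrev pvSB := PySem.Dict Int Int × PySem.Set (Int × Int × String) × List (Int × Option String × Int)

-- {u: set() for u in range(n)} then adding e[1] for each well-formed in-range edge e
def pvBAdj (n : Int) (edges : List (List Int)) : PySem.Dict Int (PySem.Set Int) :=
  edges.foldl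
    (fun d e =>
      if PySem.List.len e == 2 && decide (0 ≤ PySem.List.pyGetD e 0 0) && decide (PySem.List.pyGetD e 0 0 < n)
          && decide (0 ≤ PySem.List.pyGetD e 1 0) && decide (PySem.List.pyGetD e 1 0 < n) then
        d.modify (PySem.List.pyGetD e 0 0) PySem.Set.empty (fun s => PySem.Set.add s (PySem.List.pyGetD e 1 0))
      else d)
    ((PySem.List.pyRange 0 n 1).foldl (fun d u => d.insert u PySem.Set.empty) PySem.Dict.empty)

-- one of B's two symmetric `if` branches (au = adjacency set of u for colour col)
def pvBBranch (au : PySem.Set Int) (u : Int) (c : Option String) (d : Int) (col : String)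
    (s : pvSB) (v : Int) : pvSB :=
  if c != some col && PySem.Set.contains au v && !(PySem.Set.contains s.2.1 (u, v, col)) then
    (if s.1.getD v 0 == -1 then s.1.insert v (d + 1) else s.1,
     PySem.Set.add s.2.1 (u, v, col),
     s.2.2 ++ [(v, some col, d + 1)])
  else s

-- body of B's `for v in sorted(red_adj[u] | blue_adj[u])`
def pvBStep (ru bu : PySem.Set Int) (u : Int) (c : Option String) (d : Int)
    (s : pvSB) (v : Int) : pvSB :=
  pvBBranch bu u c d "blue" (pvBBranch ru u c d "red" s v) v

-- B's `while queue:` loop (same fuel bound; pops ≤ #seen colored edges + 1)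
def pvBLoop (redAdj blueAdj : PySem.Dict Int (PySem.Set Int)) : Nat → pvSB → PySem.Dict Int Int
  | 0, s => s.1
  | fuel + 1, s =>
    match s.2.2 with
    | [] => s.1
    | (u, c, d) :: rest =>
      pvBLoop redAdj blueAdj fuel
        ((PySem.List.sorted
            (PySem.Set.union (redAdj.getD u PySem.Set.empty) (blueAdj.getD u PySem.Set.empty))
            (fun x => x) false).foldl
          (pvBStep (redAdj.getD u PySem.Set.empty) (blueAdj.getD u PySem.Set.empty) u c d)
          (s.1, s.2.1, rest))

def shortestAlternatingPaths_alt (n : Int) (red_edges : List (List Int)) (blue_edges : List (List Int)) : List Int :=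
  if n ≤ 0 then []
  else
    let res := ((PySem.List.pyRange 0 n 1).foldl (fun d u => d.insert u (-1)) PySem.Dict.empty).insert 0 0
    let final := pvBLoop (pvBAdj n red_edges) (pvBAdj n blue_edges) (2 * n.toNat * n.toNat + 2)
      (res, PySem.Set.empty, [(0, none, 0)])
    (PySem.List.pyRange 0 n 1).map (fun u => final.getD u 0)

-- ===== PRECONDITION & SPEC =====
def Spec_shortestAlternatingPaths (n : Int) (red_edges : List (List Int)) (blue_edges : List (List Int)) (out : List Int) : Prop := out = shortestAlternatingPaths_alt n red_edges blue_edges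
instance (n : Int) (red_edges : List (List Int)) (blue_edges : List (List Int)) (out : List Int) : Decidable (Spec_shortestAlternatingPaths n red_edges blue_edges out) := by unfold Spec_shortestAlternatingPaths; infer_instance

-- ===== CLAIM (what is proved, stated in full; the proofs are below) =====
def Claim_equal_shortestAlternatingPaths : Prop := ∀ (n : Int) (red_edges : List (List Int)) (blue_edges : List (List Int)), Dom_shortestAlternatingPaths n red_edges blue_edges → Spec_shortestAlternatingPaths n red_edges blue_edges (shortestAlternatingPaths n red_edges blue_edges)

-- ===== LEMMAS AND PROOFS =====


def pvQRel (n : Int) (visited : PySem.Dict (Int × Int × Option String) Int)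
    (ta : Int × Int × Option String) (tb : Int × Option String × Int) : Prop :=
  tb.1 = ta.2.1 ∧ tb.2.1 = ta.2.2 ∧ 0 ≤ ta.2.1 ∧ ta.2.1 < n ∧
  (ta.2.2 = none ∨ ta.2.2 = some "red" ∨ ta.2.2 = some "blue") ∧
  (ta.2.2 = none → ta.1 = -1 ∧ ta.2.1 = 0 ∧ tb.2.2 = 0) ∧
  (ta.2.2 ≠ none → visited.get? ta = some tb.2.2)

def pvRel (n : Int) (sa : pvSA) (sb : pvSB) : Prop :=
  sa.1 = sb.1 ∧
  (∀ a b col, 0 ≤ a → PySem.Dict.contains sa.2.1 (a, b, some col) = PySem.Set.contains sb.2.1 (a, b, col)) ∧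
  sa.2.1.get? (-1, 0, some "red") = some 0 ∧
  sa.2.1.get? (-1, 0, some "blue") = some 0 ∧
  List.Forall₂ (pvQRel n sa.2.1) sa.2.2 sb.2.2

def pvRelP (n : Int) (prevN curN : Int) (prevColor : Option String) (d : Int)
    (sa : pvSA) (sb : pvSB) : Prop :=
  pvRel n sa sb ∧ (prevColor ≠ none → sa.2.1.get? (prevN, curN, prevColor) = some d)

def pvAdjInv (n : Int) (E : List (List Int)) (d : PySem.Dict Int (PySem.Set Int)) : Prop :=
  ∀ u, 0 ≤ u → u < n →
    (d.getD u PySem.Set.empty).Nodup ∧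
    ∀ v, v ∈ d.getD u PySem.Set.empty ↔ [u, v] ∈ E ∧ 0 ≤ v ∧ v < n

lemma pvGet?_insert_fresh {κ ν : Type} [BEq κ] [LawfulBEq κ] (d : PySem.Dict κ ν) (k k' : κ) (x v : ν)
    (hfresh : d.contains k' = false) (h : d.get? k = some x) :
    (d.insert k' v).get? k = some x := by
  have hk : k ≠ k' := by
    intro he; subst he
    rw [PySem.Dict.contains_eq_isSome_get?, h] at hfresh; simp at hfresh
  rw [PySem.Dict.get?_insert_of_ne (hne := hk), h]

lemma pvQRel_mono (n : Int) (v1 v2 : PySem.Dict (Int × Int × Option String) Int)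
    (hext : ∀ k x, v1.get? k = some x → v2.get? k = some x)
    (ta : Int × Int × Option String) (tb : Int × Option String × Int)
    (h : pvQRel n v1 ta tb) : pvQRel n v2 ta tb := by
  obtain ⟨h1, h2, h3, h4, h5, h6, h7⟩ := h
  exact ⟨h1, h2, h3, h4, h5, h6, fun hne => hext _ _ (h7 hne)⟩

lemma pvForall₂_mono (n : Int) (v1 v2 : PySem.Dict (Int × Int × Option String) Int)
    (hext : ∀ k x, v1.get? k = some x → v2.get? k = some x)
    (qa : List (Int × Int × Option String)) (qb : List (Int × Option String × Int))
    (h : List.Forall₂ (pvQRel n v1) qa qb) : List.Forall₂ (pvQRel n v2) qa qb :=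
  List.Forall₂.imp (fun a b hab => pvQRel_mono n v1 v2 hext a b hab) h

lemma pvForall₂_snoc {α β : Type} (R : α → β → Prop) (qa : List α) (qb : List β) (ta : α) (tb : β)
    (h : List.Forall₂ R qa qb) (hp : R ta tb) : List.Forall₂ R (qa ++ [ta]) (qb ++ [tb]) := by
  induction h with
  | nil => simpa
  | cons hab h ih => simpa using ⟨hab, ih⟩

-- effect of one successful push on the relation
lemma pvPush_rel (n prevN curN : Int) (prevColor : Option String) (d : Int)
    (col : String) (hcol : col = "red" ∨ col = "blue")
    (v : Int) (hv0 : 0 ≤ v) (hvn : v < n) (_hcur0 : 0 ≤ curN) (_hcurn : curN < n)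
    (counts : PySem.Dict Int Int) (visited : PySem.Dict (Int × Int × Option String) Int)
    (qa : List (Int × Int × Option String))
    (res : PySem.Dict Int Int) (seen : PySem.Set (Int × Int × String))
    (qb : List (Int × Option String × Int))
    (hrel : pvRelP n prevN curN prevColor d (counts, visited, qa) (res, seen, qb))
    (hfresh : visited.contains (curN, v, some col) = false) :
    pvRelP n prevN curN prevColor d
      ((if counts.getD v 0 == -1 then counts.insert v (d + 1) else counts),
        visited.insert (curN, v, some col) (d + 1), qa ++ [(curN, v, some col)])
      ((if res.getD v 0 == -1 then res.insert v (d + 1) else res),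
        PySem.Set.add seen (curN, v, col), qb ++ [(v, some col, d + 1)]) := by
  obtain ⟨⟨hcounts, hmem, hsr, hsb, hF⟩, hsome⟩ := hrel
  simp only at hcounts hmem hsr hsb hF hsome
  have hext : ∀ k x, visited.get? k = some x → (visited.insert (curN, v, some col) (d + 1)).get? k = some x :=
    fun k x h => pvGet?_insert_fresh _ _ _ _ _ hfresh h
  refine ⟨⟨by simp only; rw [hcounts], ?_, hext _ _ hsr, hext _ _ hsb, ?_⟩, fun hne => hext _ _ (hsome hne)⟩
  · intro a b col' ha
    simp only [PySem.Dict.contains_insert]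
    apply Bool.coe_iff_coe.mp
    simp only [Bool.or_eq_true, beq_iff_eq, Prod.mk.injEq, Option.some.injEq,
      PySem.Set.contains_iff, PySem.Set.mem_add]
    rw [← PySem.Set.contains_iff, ← hmem a b col' ha]
    constructor
    · rintro (⟨h1, h2, h3⟩ | h); · exact Or.inr ⟨h1, h2, h3⟩
      · exact Or.inl h
    · rintro (h | ⟨h1, h2, h3⟩); · exact Or.inr h
      · exact Or.inl ⟨h1, h2, h3⟩
  · simp only
    apply pvForall₂_snoc _ _ _ _ _ (pvForall₂_mono n visited _ hext _ _ hF)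
    refine ⟨rfl, rfl, hv0, hvn, ?_, by simp, fun _ => PySem.Dict.get?_insert_self _ _ _⟩
    rcases hcol with h | h <;> subst h <;> simp

-- one branch of the inner body preserves the relation
lemma pvBranch_rel (n prevN curN : Int) (prevColor : Option String) (d : Int)
    (col other : String) (edges : List (List Int)) (au : PySem.Set Int)
    (hcolors : (col = "red" ∧ other = "blue") ∨ (col = "blue" ∧ other = "red"))
    (hau : ∀ w, w ∈ au ↔ [curN, w] ∈ edges ∧ 0 ≤ w ∧ w < n)
    (hc : prevColor = none ∨ prevColor = some "red" ∨ prevColor = some "blue")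
    (hnone : prevColor = none → prevN = -1 ∧ curN = 0 ∧ d = 0)
    (hcur0 : 0 ≤ curN) (hcurn : curN < n) (v : Int) (hv0 : 0 ≤ v) (hvn : v < n)
    (sa : pvSA) (sb : pvSB)
    (hrel : pvRelP n prevN curN prevColor d sa sb) :
    pvRelP n prevN curN prevColor d
      (pvABranch edges prevN curN prevColor col other sa v)
      (pvBBranch au curN prevColor d col sb v) := by
  obtain ⟨counts, visited, qa⟩ := sa
  obtain ⟨res, seen, qb⟩ := sb
  have hg1 : (prevColor == some other || prevColor == none) = (prevColor != some col) := by
    rcases hcolors with ⟨h1, h2⟩ | ⟨h1, h2⟩ <;> subst h1 <;> subst h2 <;>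
      rcases hc with h | h | h <;> subst h <;> decide
  have hg2 : edges.contains [curN, v] = PySem.Set.contains au v := by
    apply Bool.coe_iff_coe.mp
    rw [PySem.Set.contains_iff, hau v, List.contains_iff_mem]
    exact ⟨fun h => ⟨h, hv0, hvn⟩, fun h => h.1⟩
  have hg3 : PySem.Dict.contains visited (curN, v, some col) = PySem.Set.contains seen (curN, v, col) :=
    hrel.1.2.1 curN v col hcur0
  have hguard : ((prevColor == some other || prevColor == none)
      && !(visited.contains (curN, v, some col)) && edges.contains [curN, v])
      = (prevColor != some col && PySem.Set.contains au v && !(PySem.Set.contains seen (curN, v, col))) := by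
    rw [hg1, hg2, hg3]
    cases (prevColor != some col) <;> cases PySem.Set.contains au v <;>
      cases PySem.Set.contains seen (curN, v, col) <;> rfl
  unfold pvABranch pvBBranch
  simp only
  rw [hguard]
  cases hg : (prevColor != some col && PySem.Set.contains au v && !(PySem.Set.contains seen (curN, v, col)))
  · simpa using hrel
  · have hfresh : visited.contains (curN, v, some col) = false := by
      rw [hg3]
      simp only [Bool.and_eq_true, Bool.not_eq_true'] at hg
      exact hg.2
    have hne : prevColor ≠ some col := by
      simp only [Bool.and_eq_true, bne_iff_ne] at hg
      exact hg.1.1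
    have hseedr : visited.get? (-1, 0, some "red") = some 0 := hrel.1.2.2.1
    have hseedb : visited.get? (-1, 0, some "blue") = some 0 := hrel.1.2.2.2.1
    have hread : visited.getD (prevN, curN, some other) 0 = d := by
      rcases hcolors with ⟨h1, h2⟩ | ⟨h1, h2⟩ <;> subst h1 <;> subst h2 <;>
        rcases hc with h | h | h <;> subst h
      · obtain ⟨hp, hcu, hd⟩ := hnone rfl; subst hp; subst hcu; subst hd
        rw [PySem.Dict.getD_eq_get?_getD, hseedb]; rfl
      · exact absurd rfl hne
      · have hk : visited.get? (prevN, curN, some "blue") = some d := hrel.2 (by simp)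
        rw [PySem.Dict.getD_eq_get?_getD, hk]; rfl
      · obtain ⟨hp, hcu, hd⟩ := hnone rfl; subst hp; subst hcu; subst hd
        rw [PySem.Dict.getD_eq_get?_getD, hseedr]; rfl
      · have hk : visited.get? (prevN, curN, some "red") = some d := hrel.2 (by simp)
        rw [PySem.Dict.getD_eq_get?_getD, hk]; rfl
      · exact absurd rfl hne
    simp only [if_true]
    rw [hread]
    have hcol' : col = "red" ∨ col = "blue" := by
      rcases hcolors with ⟨h1, _⟩ | ⟨h1, _⟩ <;> [exact Or.inl h1; exact Or.inr h1]
    exact pvPush_rel n prevN curN prevColor d col hcol' v hv0 hvn hcur0 hcurn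
      counts visited qa res seen qb hrel hfresh

lemma pvStep_rel (n : Int) (red_edges blue_edges : List (List Int))
    (prevN curN : Int) (prevColor : Option String) (d : Int) (ru bu : PySem.Set Int)
    (hru : ∀ w, w ∈ ru ↔ [curN, w] ∈ red_edges ∧ 0 ≤ w ∧ w < n)
    (hbu : ∀ w, w ∈ bu ↔ [curN, w] ∈ blue_edges ∧ 0 ≤ w ∧ w < n)
    (hc : prevColor = none ∨ prevColor = some "red" ∨ prevColor = some "blue")
    (hnone : prevColor = none → prevN = -1 ∧ curN = 0 ∧ d = 0)
    (hcur0 : 0 ≤ curN) (hcurn : curN < n) (v : Int) (hv0 : 0 ≤ v) (hvn : v < n)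
    (sa : pvSA) (sb : pvSB)
    (hrel : pvRelP n prevN curN prevColor d sa sb) :
    pvRelP n prevN curN prevColor d
      (pvAStep red_edges blue_edges prevN curN prevColor sa v)
      (pvBStep ru bu curN prevColor d sb v) := by
  unfold pvAStep pvBStep
  exact pvBranch_rel n prevN curN prevColor d "blue" "red" blue_edges bu (Or.inr ⟨rfl, rfl⟩)
    hbu hc hnone hcur0 hcurn v hv0 hvn _ _
    (pvBranch_rel n prevN curN prevColor d "red" "blue" red_edges ru (Or.inl ⟨rfl, rfl⟩)
      hru hc hnone hcur0 hcurn v hv0 hvn sa sb hrel)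

lemma pvFold_rel (n : Int) (red_edges blue_edges : List (List Int))
    (prevN curN : Int) (prevColor : Option String) (d : Int) (ru bu : PySem.Set Int)
    (hru : ∀ w, w ∈ ru ↔ [curN, w] ∈ red_edges ∧ 0 ≤ w ∧ w < n)
    (hbu : ∀ w, w ∈ bu ↔ [curN, w] ∈ blue_edges ∧ 0 ≤ w ∧ w < n)
    (hc : prevColor = none ∨ prevColor = some "red" ∨ prevColor = some "blue")
    (hnone : prevColor = none → prevN = -1 ∧ curN = 0 ∧ d = 0)
    (hcur0 : 0 ≤ curN) (hcurn : curN < n) :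
    ∀ (L : List Int), (∀ v ∈ L, 0 ≤ v ∧ v < n) → ∀ (sa : pvSA) (sb : pvSB),
      pvRelP n prevN curN prevColor d sa sb →
      pvRelP n prevN curN prevColor d
        (L.foldl (pvAStep red_edges blue_edges prevN curN prevColor) sa)
        (L.foldl (pvBStep ru bu curN prevColor d) sb) := by
  intro L
  induction L with
  | nil => intro _ sa sb h; exact h
  | cons v L ih =>
    intro hbnd sa sb h
    simp only [List.foldl_cons]
    exact ih (fun w hw => hbnd w (List.mem_cons_of_mem _ hw)) _ _
      (pvStep_rel n red_edges blue_edges prevN curN prevColor d ru bu hru hbu hc hnone hcur0 hcurn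
        v (hbnd v List.mem_cons_self).1 (hbnd v List.mem_cons_self).2 sa sb h)

-- fold over a list equals fold over its filtration when the step ignores filtered-out elements
lemma pvFoldl_filter {α β : Type} (l : List α) (p : α → Bool) (f : β → α → β) (init : β)
    (h : ∀ acc x, x ∈ l → p x = false → f acc x = acc) :
    l.foldl f init = (l.filter p).foldl f init := by
  rw [← PySem.List.foldl_if_eq_foldl_filter]
  apply PySem.List.foldl_congr_mem
  intro acc x hx
  by_cases hp : p x = true
  · simp [hp]
  · simp only [Bool.not_eq_true] at hp; simp [hp, h acc x hx hp]

-- A's inner body is the identity on non-neighbours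
lemma pvAStep_id (red_edges blue_edges : List (List Int))
    (prevN curN : Int) (prevColor : Option String) (sa : pvSA) (v : Int)
    (h1 : red_edges.contains [curN, v] = false) (h2 : blue_edges.contains [curN, v] = false) :
    pvAStep red_edges blue_edges prevN curN prevColor sa v = sa := by
  have h1' : [curN, v] ∉ red_edges := by simpa using h1
  have h2' : [curN, v] ∉ blue_edges := by simpa using h2
  unfold pvAStep pvABranch
  simp [h1', h2']

lemma pvAdjInit_getD (l : List Int) (dI : PySem.Dict Int (PySem.Set Int)) (u : Int) :
    (l.foldl (fun d x => d.insert x PySem.Set.empty) dI).getD u PySem.Set.empty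
      = if u ∈ l then PySem.Set.empty else dI.getD u PySem.Set.empty := by
  induction l generalizing dI with
  | nil => simp
  | cons x l ih =>
    simp only [List.foldl_cons, ih, PySem.Dict.getD_insert, List.mem_cons]
    by_cases h1 : u ∈ l
    · simp [h1]
    · by_cases h2 : u = x <;> simp [h1, h2]

lemma pvAdjInv_step (n : Int) (E : List (List Int)) (e : List Int) (d : PySem.Dict Int (PySem.Set Int))
    (h : pvAdjInv n E d) :
    pvAdjInv n (E ++ [e])
      (if PySem.List.len e == 2 && decide (0 ≤ PySem.List.pyGetD e 0 0) && decide (PySem.List.pyGetD e 0 0 < n)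
          && decide (0 ≤ PySem.List.pyGetD e 1 0) && decide (PySem.List.pyGetD e 1 0 < n) then
        d.modify (PySem.List.pyGetD e 0 0) PySem.Set.empty (fun s => PySem.Set.add s (PySem.List.pyGetD e 1 0))
      else d) := by
  intro u hu0 hun
  obtain ⟨hnd, hmem⟩ := h u hu0 hun
  split_ifs with hcond
  · simp only [Bool.and_eq_true, beq_iff_eq, decide_eq_true_eq, PySem.List.len_eq] at hcond
    obtain ⟨⟨⟨⟨hlen, ha0⟩, han⟩, hb0⟩, hbn⟩ := hcond
    have hel : ∃ a b, e = [a, b] := by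
      match e with
      | [a, b] => exact ⟨a, b, rfl⟩
      | [] => simp at hlen
      | [_] => simp at hlen
      | _ :: _ :: _ :: _ => simp at hlen; omega
    obtain ⟨a, b, rfl⟩ := hel
    have hga : PySem.List.pyGetD [a, b] (0 : Int) 0 = a := by simp [pysem]
    have hgb : PySem.List.pyGetD [a, b] (1 : Int) 0 = b := by
      rw [show ((1 : Int)) = ((1 : Nat) : Int) by norm_num, PySem.List.pyGetD_natCast]; rfl
    rw [hga, hgb] at *
    rw [PySem.Dict.getD_modify]
    by_cases hua : u = a
    · subst hua
      rw [if_pos rfl]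
      refine ⟨PySem.Set.nodup_add _ _ hnd, ?_⟩
      intro v
      rw [PySem.Set.mem_add, hmem v]
      simp only [List.mem_append, List.mem_singleton]
      constructor
      · rintro (⟨hE, hb⟩ | rfl)
        · exact ⟨Or.inl hE, hb⟩
        · exact ⟨Or.inr rfl, hb0, hbn⟩
      · rintro ⟨hE | he, hb⟩
        · exact Or.inl ⟨hE, hb⟩
        · exact Or.inr (by simpa using he)
    · rw [if_neg hua]
      refine ⟨hnd, ?_⟩
      intro v
      rw [hmem v]
      simp only [List.mem_append, List.mem_singleton]
      constructor
      · rintro ⟨hE, hb⟩; exact ⟨Or.inl hE, hb⟩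
      · rintro ⟨hE | he, hb⟩
        · exact ⟨hE, hb⟩
        · exact absurd (by simpa using he : u = a ∧ v = b).1 hua
  · refine ⟨hnd, ?_⟩
    intro v
    rw [hmem v]
    simp only [List.mem_append, List.mem_singleton]
    constructor
    · rintro ⟨hE, hb⟩; exact ⟨Or.inl hE, hb⟩
    · rintro ⟨hE | rfl, hb⟩
      · exact ⟨hE, hb⟩
      · exfalso
        apply hcond
        have hga : PySem.List.pyGetD [u, v] (0 : Int) 0 = u := by simp [pysem]
        have hgb : PySem.List.pyGetD [u, v] (1 : Int) 0 = v := by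
          rw [show ((1 : Int)) = ((1 : Nat) : Int) by norm_num, PySem.List.pyGetD_natCast]; rfl
        simp [hga, hgb, PySem.List.len_eq, hu0, hun, hb.1, hb.2]

lemma pvAdjInv_fold (n : Int) : ∀ (F E : List (List Int)) (d : PySem.Dict Int (PySem.Set Int)),
    pvAdjInv n E d →
    pvAdjInv n (E ++ F)
      (F.foldl
        (fun d e =>
          if PySem.List.len e == 2 && decide (0 ≤ PySem.List.pyGetD e 0 0) && decide (PySem.List.pyGetD e 0 0 < n)
              && decide (0 ≤ PySem.List.pyGetD e 1 0) && decide (PySem.List.pyGetD e 1 0 < n) then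
            d.modify (PySem.List.pyGetD e 0 0) PySem.Set.empty (fun s => PySem.Set.add s (PySem.List.pyGetD e 1 0))
          else d)
        d) := by
  intro F
  induction F with
  | nil => intro E d h; simpa using h
  | cons e F ih =>
    intro E d h
    have := ih (E ++ [e]) _ (pvAdjInv_step n E e d h)
    simpa [List.append_assoc] using this

lemma pvAdj_getD (n : Int) (E : List (List Int)) : pvAdjInv n E (pvBAdj n E) := by
  have hinit : pvAdjInv n []
      ((PySem.List.pyRange 0 n 1).foldl (fun d u => d.insert u PySem.Set.empty) PySem.Dict.empty) := by
    intro u _ _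
    rw [pvAdjInit_getD]
    split_ifs <;> simp [PySem.Set.empty, PySem.Dict.getD_empty]
  have := pvAdjInv_fold n E [] _ hinit
  simpa [pvBAdj] using this

lemma pvSortedUnion (n : Int) (ru bu : PySem.Set Int)
    (hrn : ru.Nodup) (_hbn : bu.Nodup)
    (hrb : ∀ v ∈ ru, 0 ≤ v ∧ v < n) (hbb : ∀ v ∈ bu, 0 ≤ v ∧ v < n) :
    PySem.List.sorted (PySem.Set.union ru bu) (fun x => x) false
      = (PySem.List.pyRange 0 n 1).filter
          (fun v => PySem.Set.contains ru v || PySem.Set.contains bu v) := by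
  apply PySem.List.sorted_eq_of_perm_of_pairwise_lt
  · apply (List.perm_ext_iff_of_nodup ?_ ?_).mpr
    · intro v
      simp only [List.mem_filter, PySem.List.mem_pyRange_one, PySem.Set.mem_union,
        Bool.or_eq_true, PySem.Set.contains_iff]
      constructor
      · rintro ⟨_, h⟩; exact h
      · intro h
        refine ⟨?_, h⟩
        rcases h with h | h
        · exact hrb v h
        · exact hbb v h
    · exact (PySem.List.nodup_pyRange_one 0 n).filter _
    · exact PySem.Set.nodup_union ru bu hrn
  · exact (PySem.List.pairwise_lt_pyRange_one 0 n).filter _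

lemma pvLoop_rel (n : Int) (red_edges blue_edges : List (List Int)) :
    ∀ (fuel : Nat) (sa : pvSA) (sb : pvSB), pvRel n sa sb →
      pvALoop n red_edges blue_edges fuel sa
        = pvBLoop (pvBAdj n red_edges) (pvBAdj n blue_edges) fuel sb := by
  intro fuel
  induction fuel with
  | zero => intro sa sb h; exact h.1
  | succ fuel ih =>
    intro sa sb h
    obtain ⟨ca, va, qa⟩ := sa
    obtain ⟨cb, sn, qb⟩ := sb
    obtain ⟨hcounts, hmem, hsr, hsb2, hF⟩ := h
    simp only at hcounts hmem hsr hsb2 hF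
    cases hF with
    | nil => simpa [pvALoop, pvBLoop] using hcounts
    | @cons ta tb qa' qb' hpair htail =>
      obtain ⟨prevN, curN, prevColor⟩ := ta
      obtain ⟨u, c, d⟩ := tb
      obtain ⟨hu, hcol, hcur0, hcurn, hcset, hnone, hsome⟩ := hpair
      simp only at hu hcol hcur0 hcurn hcset hnone hsome
      subst hu; subst hcol
      obtain ⟨hrnd, hrur⟩ := pvAdj_getD n red_edges u hcur0 hcurn
      obtain ⟨hbnd, hbur⟩ := pvAdj_getD n blue_edges u hcur0 hcurn
      simp only [pvALoop, pvBLoop]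
      rw [pvSortedUnion n _ _ hrnd hbnd
        (fun v hv => ((hrur v).mp hv).2) (fun v hv => ((hbur v).mp hv).2)]
      rw [pvFoldl_filter (PySem.List.pyRange 0 n 1)
        (fun v => PySem.Set.contains ((pvBAdj n red_edges).getD u PySem.Set.empty) v
          || PySem.Set.contains ((pvBAdj n blue_edges).getD u PySem.Set.empty) v)
        (pvAStep red_edges blue_edges prevN u c) (ca, va, qa')
        ?hid]
      case hid =>
        intro acc v hvmem hpf
        have hvb := (PySem.List.mem_pyRange_one).mp hvmem
        simp only [Bool.or_eq_false_iff] at hpf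
        have h1 : red_edges.contains [u, v] = false := by
          simp only [List.contains_eq_mem, decide_eq_false_iff_not]
          intro hmem'
          have : v ∈ (pvBAdj n red_edges).getD u PySem.Set.empty :=
            (hrur v).mpr ⟨hmem', hvb.1, hvb.2⟩
          rw [← PySem.Set.contains_iff] at this
          rw [hpf.1] at this
          exact Bool.false_ne_true this
        have h2 : blue_edges.contains [u, v] = false := by
          simp only [List.contains_eq_mem, decide_eq_false_iff_not]
          intro hmem'
          have : v ∈ (pvBAdj n blue_edges).getD u PySem.Set.empty :=
            (hbur v).mpr ⟨hmem', hvb.1, hvb.2⟩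
          rw [← PySem.Set.contains_iff] at this
          rw [hpf.2] at this
          exact Bool.false_ne_true this
        exact pvAStep_id red_edges blue_edges prevN u c acc v h1 h2
      apply ih
      have hbnds : ∀ v ∈ (PySem.List.pyRange 0 n 1).filter
          (fun v => PySem.Set.contains ((pvBAdj n red_edges).getD u PySem.Set.empty) v
            || PySem.Set.contains ((pvBAdj n blue_edges).getD u PySem.Set.empty) v),
          0 ≤ v ∧ v < n := by
        intro v hv
        exact (PySem.List.mem_pyRange_one).mp (List.mem_of_mem_filter hv)
      exact (pvFold_rel n red_edges blue_edges prevN u c d _ _ hrur hbur hcset hnone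
        hcur0 hcurn _ hbnds (ca, va, qa') (cb, sn, qb') ⟨⟨hcounts, hmem, hsr, hsb2, htail⟩, hsome⟩).1

-- ===== VERDICT (by name: the statement is the Claim_ definition above) =====
theorem shortestAlternatingPaths_spec : Claim_equal_shortestAlternatingPaths := by
  intro n red_edges blue_edges _
  unfold Spec_shortestAlternatingPaths
  by_cases hn : n ≤ 0
  · simp [shortestAlternatingPaths, shortestAlternatingPaths_alt, hn,
      PySem.List.pyRange_one_eq_nil hn]
  · have hn' : 0 < n := by omega
    have hinit : pvRel n
        (((PySem.List.pyRange 0 n 1).foldl (fun d i => d.insert i (-1)) PySem.Dict.empty).insert 0 0,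
         (((PySem.Dict.empty.insert ((-1 : Int), (0 : Int), some "red") 0).insert (-1, 0, some "blue") 0).insert
           (-1, 0, none) 0),
         [(-1, 0, none)])
        (((PySem.List.pyRange 0 n 1).foldl (fun d u => d.insert u (-1)) PySem.Dict.empty).insert 0 0,
         PySem.Set.empty, [(0, none, 0)]) := by
      refine ⟨rfl, ?_, ?_, ?_, ?_⟩
      · intro a b col ha
        apply Bool.coe_iff_coe.mp
        simp only [PySem.Dict.contains_insert, PySem.Dict.contains_empty, Bool.or_false,
          Bool.or_eq_true, beq_iff_eq, Prod.mk.injEq, PySem.Set.contains_iff]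
        constructor
        · rintro (⟨h, -⟩ | ⟨h, -⟩ | ⟨h, -⟩) <;> omega
        · intro hco; simp [PySem.Set.empty] at hco
      · show ((((PySem.Dict.empty.insert ((-1 : Int), (0 : Int), some "red") 0).insert
            (-1, 0, some "blue") 0).insert (-1, 0, none) 0)).get? (-1, 0, some "red") = some 0
        decide
      · show ((((PySem.Dict.empty.insert ((-1 : Int), (0 : Int), some "red") 0).insert
            (-1, 0, some "blue") 0).insert (-1, 0, none) 0)).get? (-1, 0, some "blue") = some 0
        decide
      · refine List.Forall₂.cons ?_ List.Forall₂.nil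
        exact ⟨rfl, rfl, le_refl 0, hn', Or.inl rfl, fun _ => ⟨rfl, rfl, rfl⟩, fun h => absurd rfl h⟩
    have hloops := pvLoop_rel n red_edges blue_edges (2 * n.toNat * n.toNat + 2) _ _ hinit
    simp only [shortestAlternatingPaths, shortestAlternatingPaths_alt, if_neg hn]
    rw [PySem.List.foldl_append_singleton_eq_map, List.nil_append, hloops]
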